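-- pv_equiv track=rewrite | github.com/taylorparsons/athena-skill | skills/athena/scripts/progress_schema.py | _section_bounds
-- ===== SOURCE A (Python) =====
-- SECTION_HEADERS = ["DONE", "IN PROGRESS", "NEXT", "NOTES"]
--
-- def _find_section_indices(lines: list[str], section: str) -> list[int]:
--     return [idx for idx, line in enumerate(lines) if line.strip() == section]
--
-- def _section_bounds(lines: list[str], section: str) -> tuple[int, int] | None:
--     section_indices = _find_section_indices(lines, section)
--     if len(section_indices) != 1:
--         return None
--
--     start = section_indices[0]
--     end = len(lines)
--     for other in SECTION_HEADERS:
--         if other == section: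
--             continue
--         for idx in _find_section_indices(lines, other):
--             if idx > start:
--                 end = min(end, idx)
--     return start, end
-- ===== SOURCE B (Python) =====
-- SECTION_HEADERS = ["DONE", "IN PROGRESS", "NEXT", "NOTES"]
--
-- def _section_bounds(lines: list[str], section: str) -> tuple[int, int] | None:
--     start = None
--     for idx, line in enumerate(lines):
--         if line.strip() == section:
--             if start is not None:
--                 return None
--             start = idx
--     if start is None:
--         return None
--     for idx, line in enumerate(lines[start + 1:], start + 1):
--         s = line.strip()
--         if s != section and s in SECTION_HEADERS:
--             return start, idx
--     return start, len(lines)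
-- ===== Notes on version B (the rewrite author's own statement) =====
-- stated objective: simpler
-- what changed: Replaces A's per-header full scans (building an index list for each of the four headers and folding a min over each) with one uniqueness pass for the section plus one early-stopping forward scan that returns at the first later header line.
import Mathlib
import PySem

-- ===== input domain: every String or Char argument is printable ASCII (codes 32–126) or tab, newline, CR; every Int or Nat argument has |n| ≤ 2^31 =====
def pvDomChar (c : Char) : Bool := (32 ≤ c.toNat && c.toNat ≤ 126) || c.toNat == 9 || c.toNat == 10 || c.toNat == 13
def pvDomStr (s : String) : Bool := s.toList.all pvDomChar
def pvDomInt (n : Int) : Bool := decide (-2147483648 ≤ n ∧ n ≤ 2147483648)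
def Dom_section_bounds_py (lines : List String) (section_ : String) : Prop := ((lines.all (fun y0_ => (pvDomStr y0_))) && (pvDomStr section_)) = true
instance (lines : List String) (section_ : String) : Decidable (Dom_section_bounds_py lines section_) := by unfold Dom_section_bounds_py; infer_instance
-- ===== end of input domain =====

-- B replaces A's four per-header full scans with one uniqueness pass plus one
-- early-stopping forward scan (objective: simpler).

-- ===== PORT A =====
def SECTION_HEADERS : List String := ["DONE", "IN PROGRESS", "NEXT", "NOTES"]

-- [idx for idx, line in enumerate(lines) if line.strip() == section]
def findSectionIndices (lines : List String) (section_ : String) : List Int :=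
  ((PySem.List.enumerate lines).filter (fun p => PySem.Str.strip p.2 == section_)).map (fun p => p.1)

def section_bounds_py (lines : List String) (section_ : String) : Option (Int × Int) :=
  let sectionIndices := findSectionIndices lines section_
  if sectionIndices.length ≠ 1 then none
  else
    let start := sectionIndices.headD 0          -- section_indices[0] (nonempty here)
    let endv : Int :=
      SECTION_HEADERS.foldl (fun e other =>
        if other == section_ then e
        else (findSectionIndices lines other).foldl
          (fun e idx => if idx > start then min e idx else e) e)
        ((lines.length : Int))
    some (start, endv)

-- ===== PORT B =====
-- first loop of Source B: early 'return None' on a second occurrence is the outer 'none'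
def bFirstPass (section_ : String) : List String → Int → Option Int → Option (Option Int)
  | [], _, st => some st
  | l :: ls, idx, st =>
    if PySem.Str.strip l == section_ then
      match st with
      | some _ => none
      | none => bFirstPass section_ ls (idx + 1) (some idx)
    else bFirstPass section_ ls (idx + 1) st

-- second loop of Source B over enumerate(lines[start+1:], start+1)
def bFindEnd (section_ : String) (len_ : Int) : List (Int × String) → Int
  | [] => len_
  | (idx, l) :: rest =>
    let s := PySem.Str.strip l
    if s != section_ && SECTION_HEADERS.contains s then idx
    else bFindEnd section_ len_ rest

def section_bounds_py_alt (lines : List String) (section_ : String) : Option (Int × Int) :=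
  match bFirstPass section_ lines 0 none with
  | none => none                                  -- early 'return None' (duplicate)
  | some none => none                             -- no occurrence
  | some (some start) =>
    some (start,
      bFindEnd section_ (lines.length : Int)
        (PySem.List.enumerate (PySem.List.slice lines (some (start + 1)) none) (start + 1)))

-- ===== PRECONDITION & SPEC =====
def Spec_section_bounds_py (lines : List String) (section_ : String) (out : Option (Int × Int)) : Prop := out = section_bounds_py_alt lines section_
instance (lines : List String) (section_ : String) (out : Option (Int × Int)) : Decidable (Spec_section_bounds_py lines section_ out) := by unfold Spec_section_bounds_py; infer_instance

-- ===== CLAIM (what is proved, stated in full; the proofs are below) =====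
def Claim_equal_section_bounds_py : Prop := ∀ (lines : List String) (section_ : String), Dom_section_bounds_py lines section_ → Spec_section_bounds_py lines section_ (section_bounds_py lines section_)

-- ===== LEMMAS AND PROOFS =====

-- offset-generalised version of findSectionIndices
def fsiFrom (section_ : String) (ls : List String) (i : Int) : List Int :=
  ((PySem.List.enumerate ls i).filter (fun p => PySem.Str.strip p.2 == section_)).map (fun p => p.1)

theorem fsiFrom_nil (section_ : String) (i : Int) : fsiFrom section_ [] i = [] := rfl

theorem fsiFrom_cons (section_ : String) (l : String) (ls : List String) (i : Int) :
    fsiFrom section_ (l :: ls) i =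
      if PySem.Str.strip l == section_ then i :: fsiFrom section_ ls (i + 1)
      else fsiFrom section_ ls (i + 1) := by
  simp only [fsiFrom, PySem.List.enumerate_cons, List.filter_cons]
  split <;> simp

theorem findSectionIndices_eq (lines : List String) (section_ : String) :
    findSectionIndices lines section_ = fsiFrom section_ lines 0 := rfl

theorem bFirstPass_some (section_ : String) (ls : List String) :
    ∀ i j, bFirstPass section_ ls i (some j) =
      if fsiFrom section_ ls i = [] then some (some j) else none := by
  induction ls with
  | nil => intro i j; simp [bFirstPass, fsiFrom_nil]
  | cons l ls ih =>
    intro i j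
    rw [fsiFrom_cons]
    by_cases h : PySem.Str.strip l == section_
    · simp [bFirstPass, h]
    · simp only [bFirstPass, h, if_neg, Bool.not_eq_true] at *
      simp [h, ih]

theorem bFirstPass_none (section_ : String) (ls : List String) :
    ∀ i, bFirstPass section_ ls i none =
      match fsiFrom section_ ls i with
      | [] => some none
      | [j] => some (some j)
      | _ => none := by
  induction ls with
  | nil => intro i; simp [bFirstPass, fsiFrom_nil]
  | cons l ls ih =>
    intro i
    rw [fsiFrom_cons]
    by_cases h : PySem.Str.strip l == section_
    · simp only [bFirstPass, h, if_pos, bFirstPass_some]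
      cases hh : fsiFrom section_ ls (i + 1) <;> simp [hh]
    · simp only [bFirstPass, h, if_neg, Bool.not_eq_true] at *
      simp [h, ih]

-- min over the first components of the entries satisfying c
def minP? (c : Int × String → Bool) : List (Int × String) → Option Int
  | [] => none
  | q :: ys =>
    let r := minP? c ys
    if c q then some (match r with | none => q.1 | some m => min q.1 m) else r

def omin : Option Int → Option Int → Option Int
  | none, b => b
  | some a, none => some a
  | some a, some b => some (min a b)

def oapp (o : Option Int) (e : Int) : Int :=
  match o with | none => e | some m => min e m

theorem oapp_oapp (o1 o2 : Option Int) (e : Int) :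
    oapp o2 (oapp o1 e) = oapp (omin o1 o2) e := by
  cases o1 <;> cases o2 <;> simp [oapp, omin, min_assoc]

theorem minP?_congr (c d : Int × String → Bool) (xs : List (Int × String))
    (h : ∀ q ∈ xs, c q = d q) : minP? c xs = minP? d xs := by
  induction xs with
  | nil => rfl
  | cons q ys ih =>
    simp only [minP?]
    rw [h q (by simp), ih (fun r hr => h r (by simp [hr]))]

theorem minP?_none (c : Int × String → Bool) (xs : List (Int × String))
    (h : ∀ q ∈ xs, c q = false) : minP? c xs = none := by
  induction xs with
  | nil => rfl
  | cons q ys ih =>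
    simp only [minP?, h q (by simp)]
    exact ih (fun r hr => h r (by simp [hr]))

theorem minP?_append (c : Int × String → Bool) (xs ys : List (Int × String)) :
    minP? c (xs ++ ys) = omin (minP? c xs) (minP? c ys) := by
  induction xs with
  | nil => simp [minP?, omin]
  | cons q xs ih =>
    simp only [List.cons_append, minP?, ih]
    by_cases h : c q
    · simp only [h, if_pos]
      cases minP? c xs <;> cases minP? c ys <;> simp [omin, min_assoc]
    · rw [if_neg h, if_neg h]

theorem minP?_or (a b : Int × String → Bool) (xs : List (Int × String)) :
    minP? (fun q => a q || b q) xs = omin (minP? a xs) (minP? b xs) := by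
  induction xs with
  | nil => rfl
  | cons q ys ih =>
    simp only [minP?, ih]
    by_cases ha : a q <;> by_cases hb : b q <;>
      simp [ha, hb] <;>
      cases minP? a ys <;> cases minP? b ys <;>
      simp [omin] <;> omega

theorem minP?_mem (c : Int × String → Bool) (xs : List (Int × String)) (m : Int)
    (h : minP? c xs = some m) : ∃ q ∈ xs, q.1 = m := by
  induction xs generalizing m with
  | nil => simp [minP?] at h
  | cons q ys ih =>
    simp only [minP?] at h
    by_cases hc : c q
    · simp only [hc, if_pos] at h
      cases hm : minP? c ys with
      | none => simp [hm] at h; exact ⟨q, by simp, by omega⟩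
      | some m' =>
        simp [hm] at h
        rcases le_total q.1 m' with hle | hle
        · exact ⟨q, by simp, by rw [← h]; simpa [min_eq_left hle]⟩
        · rcases ih m' hm with ⟨r, hr, hr1⟩
          exact ⟨r, by simp [hr], by rw [← h, hr1]; simpa [min_eq_right hle]⟩
    · rw [if_neg hc] at h
      rcases ih m h with ⟨r, hr, hr1⟩
      exact ⟨r, by simp [hr], hr1⟩

-- A's inner fold over a filtered-and-mapped index list, as a fold over the entries
theorem foldl_fsi (p : Int × String → Bool) (s : Int) (xs : List (Int × String)) :
    ∀ e, ((xs.filter p).map (fun q => q.1)).foldl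
        (fun e idx => if idx > s then min e idx else e) e
      = xs.foldl (fun e q => if p q && q.1 > s then min e q.1 else e) e := by
  induction xs with
  | nil => intro e; rfl
  | cons q ys ih =>
    intro e
    by_cases h : p q
    · by_cases h2 : q.1 > s <;> simp [h, h2, List.filter_cons, ih]
    · simp [h, List.filter_cons, ih]

-- A's min-update fold equals the oapp of minP?
theorem foldl_min_eq_oapp (c : Int × String → Bool) (xs : List (Int × String)) :
    ∀ e, xs.foldl (fun e q => if c q then min e q.1 else e) e = oapp (minP? c xs) e := by
  induction xs with
  | nil => intro e; rfl
  | cons q ys ih =>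
    intro e
    by_cases h : c q <;> simp only [List.foldl_cons, minP?, h, if_pos, if_neg, ih]
    · cases hm : minP? c ys <;> simp [oapp, min_assoc]
    · simp [h]

-- one header's contribution in A, as oapp of a minP?
theorem headerStep (section_ other : String) (s : Int) (xs : List (Int × String)) (e : Int) :
    (if other == section_ then e
     else (((xs.filter (fun p => PySem.Str.strip p.2 == other)).map (fun q => q.1)).foldl
       (fun e idx => if idx > s then min e idx else e) e))
    = oapp (minP? (fun q => (other != section_) && (PySem.Str.strip q.2 == other) && (q.1 > s)) xs) e := by
  by_cases h : other == section_
  · rw [if_pos h, minP?_none _ _ (by intro q _; simp [eq_of_beq h]), oapp]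
  · rw [if_neg h, foldl_fsi, foldl_min_eq_oapp]
    apply congrArg (fun o => oapp o e)
    apply minP?_congr
    intro q _
    simp only [bne, h, Bool.not_false, Bool.true_and, decide_eq_true_eq, Bool.and_assoc]

-- first-hit scan on an index-sorted list equals the minimum hit
theorem bFindEnd_eq (section_ : String) (len_ : Int) (ys : List (Int × String))
    (hs : ys.Pairwise (fun p q => p.1 < q.1)) :
    bFindEnd section_ len_ ys =
      match minP? (fun q => PySem.Str.strip q.2 != section_ && SECTION_HEADERS.contains (PySem.Str.strip q.2)) ys with
      | none => len_
      | some m => m := by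
  induction ys with
  | nil => rfl
  | cons q ys ih =>
    rcases List.pairwise_cons.mp hs with ⟨hq, hrest⟩
    by_cases h : (PySem.Str.strip q.2 != section_ && SECTION_HEADERS.contains (PySem.Str.strip q.2))
    · obtain ⟨i, l⟩ := q
      simp only [bFindEnd, minP?] at *
      simp only [h, if_pos]
      cases hm : minP? (fun q => PySem.Str.strip q.2 != section_ && SECTION_HEADERS.contains (PySem.Str.strip q.2)) ys with
      | none => simp
      | some m =>
        rcases minP?_mem _ _ _ hm with ⟨r, hr, hr1⟩
        have : (i, l).1 < r.1 := hq r hr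
        simp only []
        have : min i m = i := by simp at this; omega
        simp [this]
    · obtain ⟨i, l⟩ := q
      simp only [bFindEnd, minP?] at *
      simp only [h, Bool.false_eq_true, if_false, if_neg]
      exact ih hrest

theorem enumerate_fst_lt {α : Type} (xs : List α) (s : Int) (q : Int × α)
    (h : q ∈ PySem.List.enumerate xs s) : s ≤ q.1 ∧ q.1 < s + xs.length := by
  rcases (PySem.List.mem_enumerate_iff _ _ _).mp h with ⟨k, hk, rfl⟩
  constructor <;> simp <;> omega

-- main equality of the two end computations, given the unique occurrence index s0
theorem end_eq (lines : List String) (section_ : String) (s0 : Int)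
    (hocc : fsiFrom section_ lines 0 = [s0]) :
    SECTION_HEADERS.foldl (fun e other =>
        if other == section_ then e
        else (findSectionIndices lines other).foldl
          (fun e idx => if idx > s0 then min e idx else e) e)
      ((lines.length : Int))
    = bFindEnd section_ (lines.length : Int)
        (PySem.List.enumerate (PySem.List.slice lines (some (s0 + 1)) none) (s0 + 1)) := by
  -- s0 is a valid index: 0 ≤ s0 < lines.length
  have hs0 : 0 ≤ s0 ∧ s0 < (lines.length : Int) := by
    have : s0 ∈ fsiFrom section_ lines 0 := by rw [hocc]; simp
    unfold fsiFrom at this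
    simp only [List.mem_map, List.mem_filter] at this
    rcases this with ⟨q, ⟨hq, _⟩, rfl⟩
    exact ⟨(enumerate_fst_lt _ _ _ hq).1, by have := (enumerate_fst_lt _ _ _ hq).2; omega⟩
  obtain ⟨hs0a, hs0b⟩ := hs0
  have hcast : ((s0.toNat : Int)) = s0 := Int.toNat_of_nonneg hs0a
  set n : Nat := s0.toNat + 1 with hn
  have hslice : PySem.List.slice lines (some (s0 + 1)) none = lines.drop n := by
    have h1 : s0 + 1 = ((n : Int)) := by omega
    rw [h1, PySem.List.slice_from_natCast]
  have hnle : n ≤ lines.length := by omega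
  set cB : Int × String → Bool := fun q => PySem.Str.strip q.2 != section_ && SECTION_HEADERS.contains (PySem.Str.strip q.2) with hcB
  set cBs : Int × String → Bool := fun q => cB q && q.1 > s0 with hcBs
  -- full enumerate splits at n
  have hsplit : PySem.List.enumerate lines 0
      = PySem.List.enumerate (lines.take n) 0 ++ PySem.List.enumerate (lines.drop n) (s0 + 1) := by
    have hofs : (0 : Int) + (((lines.take n).length : Nat) : Int) = s0 + 1 := by
      simp [List.length_take, Nat.min_eq_left hnle]; omega
    conv_lhs => rw [← List.take_append_drop n lines]
    rw [PySem.List.enumerate_append, hofs]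
  -- A's fold, via headerStep, over the full enumerate = oapp of a single minP?
  have hA : SECTION_HEADERS.foldl (fun e other =>
        if other == section_ then e
        else (findSectionIndices lines other).foldl
          (fun e idx => if idx > s0 then min e idx else e) e)
      ((lines.length : Int)) = oapp (minP? cBs (PySem.List.enumerate lines 0)) ((lines.length : Int)) := by
    show List.foldl _ _ (["DONE", "IN PROGRESS", "NEXT", "NOTES"]) = _
    simp only [List.foldl_cons, List.foldl_nil]
    unfold findSectionIndices
    rw [headerStep, headerStep, headerStep, headerStep,
        oapp_oapp, oapp_oapp, oapp_oapp, ← minP?_or, ← minP?_or, ← minP?_or]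
    apply congrArg (fun o => oapp o ((lines.length : Int)))
    apply minP?_congr
    intro q _
    simp only [hcBs, hcB, SECTION_HEADERS, List.contains_cons, List.contains_nil]
    cases h1 : PySem.Str.strip q.2 == "DONE" <;>
    cases h2 : PySem.Str.strip q.2 == "IN PROGRESS" <;>
    cases h3 : PySem.Str.strip q.2 == "NEXT" <;>
    cases h4 : PySem.Str.strip q.2 == "NOTES" <;>
    cases h5 : PySem.Str.strip q.2 == section_ <;>
    simp_all [bne]
  rw [hA]
  -- the prefix contributes nothing; on the suffix cBs agrees with cB
  have hpre : minP? cBs (PySem.List.enumerate (lines.take n) 0) = none := by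
    apply minP?_none
    intro q hq
    have hlt := (enumerate_fst_lt _ _ _ hq).2
    have hlen : (lines.take n).length ≤ n := by simp [List.length_take]
    have hle : q.1 ≤ s0 := by simp only [zero_add] at hlt; omega
    simp [hcBs, show ¬ (q.1 > s0) from by omega]
  have hsuf : minP? cBs (PySem.List.enumerate (lines.drop n) (s0 + 1))
      = minP? cB (PySem.List.enumerate (lines.drop n) (s0 + 1)) := by
    apply minP?_congr
    intro q hq
    have hge := (enumerate_fst_lt _ _ _ hq).1
    simp [hcBs, show q.1 > s0 from by omega]
  have hfull : minP? cBs (PySem.List.enumerate lines 0)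
      = minP? cB (PySem.List.enumerate (lines.drop n) (s0 + 1)) := by
    rw [hsplit, minP?_append, hpre, hsuf]; rfl
  rw [hfull, hslice]
  rw [bFindEnd_eq _ _ _ (PySem.List.pairwise_lt_enumerate _ _)]
  -- finally: oapp (some m) len = m since every hit index is < len
  cases hm : minP? cB (PySem.List.enumerate (lines.drop n) (s0 + 1)) with
  | none => rfl
  | some m =>
    rcases minP?_mem _ _ _ hm with ⟨r, hr, hr1⟩
    have hb := (enumerate_fst_lt _ _ _ hr).2
    have hdr : (lines.drop n).length = lines.length - n := by simp
    have hmlt : m < (lines.length : Int) := by rw [← hr1]; rw [hdr] at hb; omega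
    simp [oapp, min_eq_right (le_of_lt hmlt)]

-- ===== VERDICT (by name: the statement is the Claim_ definition above) =====
theorem section_bounds_py_spec : Claim_equal_section_bounds_py := by
  intro lines section_ _
  unfold Spec_section_bounds_py section_bounds_py section_bounds_py_alt
  rw [bFirstPass_none, findSectionIndices_eq]
  cases hocc : fsiFrom section_ lines 0 with
  | nil => simp
  | cons s0 rest =>
    cases rest with
    | nil =>
      have h := end_eq lines section_ s0 hocc
      simpa using h
    | cons s1 rest' => simp
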